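-- pv_equiv track=rewrite | github.com/fernandaleonn/LIMAsquare | ortogonalidad.py | ortogonalidad_latina
-- ===== SOURCE A (Python) =====
-- def ortogonalidad_latina(cuadrado_1, cuadrado_2):
--     for i in range(len(cuadrado_1)):
--         for j in range(len(cuadrado_1)):
--             for k in range(len(cuadrado_1)):
--                 for l in range(len(cuadrado_1)):
--                     if (i, j) != (k, l):
--                         if (cuadrado_1[k][l] == cuadrado_1[i][j] & cuadrado_2[k][l] == cuadrado_2[i][j]):
--                            if(cuadrado_1[k][l] == cuadrado_2[i][j] and cuadrado_2[k][l] == cuadrado_1[i][j]):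
--                             return "No son ortogonales"
-- ===== SOURCE B (Python) =====
-- def ortogonalidad_latina(cuadrado_1, cuadrado_2):
--     # One pass over the cells: A's (&-mangled) condition fires exactly when two
--     # distinct cells carry the same value in BOTH squares simultaneously, i.e.
--     # some value v occurs at two cells where cuadrado_1 == cuadrado_2 == v.
--     n = len(cuadrado_1)
--     celdas = [(i, j) for i in range(n) for j in range(n)]
--     vistos = set()
--     for (i, j) in celdas:
--         if cuadrado_1[i][j] == cuadrado_2[i][j]:
--             if cuadrado_1[i][j] in vistos:
--                 return "No son ortogonales"
--             vistos.add(cuadrado_1[i][j])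
--     return None
-- ===== Notes on version B (the rewrite author's own statement) =====
-- stated objective: faster
-- what changed: A rescans all n^2 cells for every cell (four nested loops); B makes one pass over the cells keeping a set of the values already seen at cells where the two squares coincide (A's &-chained condition fires exactly when two distinct cells carry the same value in both squares), returning on the first repeat.
-- outside the precondition, e.g. on ortogonalidad_latina([[1, 1], [2]], [[1, 1], [2]]): A returns 'No son ortogonales', B returns 'No son ortogonales'; on ortogonalidad_latina([[]], []): A returns None, B raises IndexError
import Mathlib
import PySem

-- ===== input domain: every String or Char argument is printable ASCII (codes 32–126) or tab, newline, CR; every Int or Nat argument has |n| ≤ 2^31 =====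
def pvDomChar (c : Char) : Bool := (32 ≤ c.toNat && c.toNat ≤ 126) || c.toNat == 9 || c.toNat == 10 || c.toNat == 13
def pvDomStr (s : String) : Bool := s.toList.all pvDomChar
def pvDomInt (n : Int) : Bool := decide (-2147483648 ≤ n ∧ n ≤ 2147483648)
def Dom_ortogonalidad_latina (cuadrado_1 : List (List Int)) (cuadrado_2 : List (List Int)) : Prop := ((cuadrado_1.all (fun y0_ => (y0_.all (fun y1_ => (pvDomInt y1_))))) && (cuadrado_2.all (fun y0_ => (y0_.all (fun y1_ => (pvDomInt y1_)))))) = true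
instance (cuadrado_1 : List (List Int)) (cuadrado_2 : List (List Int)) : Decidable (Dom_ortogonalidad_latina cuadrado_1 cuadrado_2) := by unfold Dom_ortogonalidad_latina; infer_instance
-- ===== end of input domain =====

-- B replaces A's quadruple loop (a rescan of all cells for every cell) by a single pass over the
-- cells with a set of the values already seen at cells where the two squares coincide; the
-- return value is unchanged.

-- ===== PORT A =====
-- m[i][j]; PySem.List.pyGet? none = IndexError — Pre_ keeps every executed access in range, so
-- the defaults of pyGetD are never taken on admitted inputs.
def celda (m : List (List Int)) (i j : Int) : Int :=
  PySem.List.pyGetD (PySem.List.pyGetD m i []) j 0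

def ortogonalidad_latina (cuadrado_1 : List (List Int)) (cuadrado_2 : List (List Int)) : Option String :=
  -- the 'return' inside four nested for-loops is findSome? over the four ranges
  (PySem.List.pyRange 0 cuadrado_1.length 1).findSome? (fun i =>
  (PySem.List.pyRange 0 cuadrado_1.length 1).findSome? (fun j =>
  (PySem.List.pyRange 0 cuadrado_1.length 1).findSome? (fun k =>
  (PySem.List.pyRange 0 cuadrado_1.length 1).findSome? (fun l =>
    if (i, j) ≠ (k, l) then
      -- Python's chained comparison  c1[k][l] == (c1[i][j] & c2[k][l]) == c2[i][j]
      if celda cuadrado_1 k l = PySem.Int.band (celda cuadrado_1 i j) (celda cuadrado_2 k l) ∧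
         PySem.Int.band (celda cuadrado_1 i j) (celda cuadrado_2 k l) = celda cuadrado_2 i j then
        if celda cuadrado_1 k l = celda cuadrado_2 i j ∧ celda cuadrado_2 k l = celda cuadrado_1 i j then
          some "No son ortogonales"
        else none
      else none
    else none))))

-- ===== PORT B =====
-- the for-loop over `celdas` with the early return and the growing set `vistos`
def bLoop (cuadrado_1 cuadrado_2 : List (List Int)) :
    List (Int × Int) → PySem.Set Int → Option String
  | [], _ => none
  | (i, j) :: resto, vistos =>
    if celda cuadrado_1 i j = celda cuadrado_2 i j then
      if PySem.Set.contains vistos (celda cuadrado_1 i j) then some "No son ortogonales"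
      else bLoop cuadrado_1 cuadrado_2 resto (PySem.Set.add vistos (celda cuadrado_1 i j))
    else bLoop cuadrado_1 cuadrado_2 resto vistos

def ortogonalidad_latina_alt (cuadrado_1 : List (List Int)) (cuadrado_2 : List (List Int)) : Option String :=
  let n := (cuadrado_1.length : Int)
  let celdas := (PySem.List.pyRange 0 n 1).flatMap
    (fun i => (PySem.List.pyRange 0 n 1).map (fun j => (i, j)))
  bLoop cuadrado_1 cuadrado_2 celdas PySem.Set.empty

-- ===== PRECONDITION & SPEC =====
-- Pre_ excludes mismatched/ragged shapes (a scanned row shorter than len(cuadrado_1), or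
-- cuadrado_2 with fewer rows than cuadrado_1): on these A raises IndexError, except for a few
-- degenerate ones where A happens to return before reaching the short row (see the cites).
def Pre_ortogonalidad_latina (cuadrado_1 : List (List Int)) (cuadrado_2 : List (List Int)) : Prop :=
  cuadrado_1 = [] ∨
  (cuadrado_1.length ≤ cuadrado_2.length ∧
   (∀ r ∈ cuadrado_1, cuadrado_1.length ≤ r.length) ∧
   (∀ r ∈ cuadrado_2.take cuadrado_1.length, cuadrado_1.length ≤ r.length))
instance (cuadrado_1 : List (List Int)) (cuadrado_2 : List (List Int)) : Decidable (Pre_ortogonalidad_latina cuadrado_1 cuadrado_2) := by unfold Pre_ortogonalidad_latina; infer_instance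

def pvWitness_ortogonalidad_latina : List (List Int) × List (List Int) :=
  ([[1, 2], [2, 1]], [[1, 2], [2, 1]])

def Spec_ortogonalidad_latina (cuadrado_1 : List (List Int)) (cuadrado_2 : List (List Int)) (out : Option String) : Prop := out = ortogonalidad_latina_alt cuadrado_1 cuadrado_2
instance (cuadrado_1 : List (List Int)) (cuadrado_2 : List (List Int)) (out : Option String) : Decidable (Spec_ortogonalidad_latina cuadrado_1 cuadrado_2 out) := by unfold Spec_ortogonalidad_latina; infer_instance

-- ===== CLAIM (what is proved, stated in full; the proofs are below) =====
def Claim_equal_ortogonalidad_latina : Prop := ∀ (cuadrado_1 : List (List Int)) (cuadrado_2 : List (List Int)), Dom_ortogonalidad_latina cuadrado_1 cuadrado_2 → Pre_ortogonalidad_latina cuadrado_1 cuadrado_2 → Spec_ortogonalidad_latina cuadrado_1 cuadrado_2 (ortogonalidad_latina cuadrado_1 cuadrado_2)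

-- ===== LEMMAS AND PROOFS =====

-- the cell list B iterates over (the same term as in ortogonalidad_latina_alt)
def celdasDe (cuadrado_1 : List (List Int)) : List (Int × Int) :=
  (PySem.List.pyRange 0 (cuadrado_1.length : Int) 1).flatMap
    (fun i => (PySem.List.pyRange 0 (cuadrado_1.length : Int) 1).map (fun j => (i, j)))

lemma findSome?_ite_prop {α : Type} (l : List α) (P : α → Prop) [DecidablePred P] (m : String) :
    l.findSome? (fun x => if P x then some m else none) =
      if ∃ x ∈ l, P x then some m else none := by
  induction l with
  | nil => simp
  | cons a t ih =>
    by_cases h : P a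
    · simp [h]
    · simp [h, ih]

lemma band_chain_iff (a b p q : Int) :
    ((p = PySem.Int.band a q ∧ PySem.Int.band a q = b) ∧ (p = b ∧ q = a)) ↔
      (a = b ∧ p = q ∧ a = p) := by
  constructor
  · rintro ⟨⟨h1, h2⟩, h3, h4⟩
    subst h4
    rw [PySem.Int.band_self] at h1 h2
    omega
  · rintro ⟨h1, h2, h3⟩
    have hq : q = a := by omega
    subst hq
    rw [PySem.Int.band_self]
    omega

lemma portA_eq (c1 c2 : List (List Int)) :
    ortogonalidad_latina c1 c2 =
      if ∃ x ∈ celdasDe c1, ∃ y ∈ celdasDe c1, x ≠ y ∧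
           celda c1 x.1 x.2 = celda c2 x.1 x.2 ∧ celda c1 y.1 y.2 = celda c2 y.1 y.2 ∧
           celda c1 x.1 x.2 = celda c1 y.1 y.2
      then some "No son ortogonales" else none := by
  have hbody : ∀ i j k l : Int,
      (if (i, j) ≠ (k, l) then
         if celda c1 k l = PySem.Int.band (celda c1 i j) (celda c2 k l) ∧
            PySem.Int.band (celda c1 i j) (celda c2 k l) = celda c2 i j then
           if celda c1 k l = celda c2 i j ∧ celda c2 k l = celda c1 i j then
             some "No son ortogonales"
           else none
         else none
       else (none : Option String)) =
      if ((i, j) ≠ (k, l) ∧ celda c1 i j = celda c2 i j ∧ celda c1 k l = celda c2 k l ∧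
          celda c1 i j = celda c1 k l)
      then some "No son ortogonales" else none := by
    intro i j k l
    by_cases hne : (i, j) ≠ (k, l)
    · rw [if_pos hne]
      by_cases h1 : (celda c1 k l = PySem.Int.band (celda c1 i j) (celda c2 k l) ∧
          PySem.Int.band (celda c1 i j) (celda c2 k l) = celda c2 i j)
      · rw [if_pos h1]
        by_cases h2 : (celda c1 k l = celda c2 i j ∧ celda c2 k l = celda c1 i j)
        · rw [if_pos h2, if_pos ⟨hne, (band_chain_iff _ _ _ _).1 ⟨h1, h2⟩⟩]
        · rw [if_neg h2, if_neg]
          intro hh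
          exact h2 ((band_chain_iff _ _ _ _).2 hh.2).2
      · rw [if_neg h1, if_neg]
        intro hh
        exact h1 ((band_chain_iff _ _ _ _).2 hh.2).1
    · rw [if_neg hne, if_neg (fun hh => hne hh.1)]
  unfold ortogonalidad_latina
  simp only [hbody, findSome?_ite_prop]
  apply if_congr _ rfl rfl
  simp only [celdasDe, List.mem_flatMap, List.mem_map]
  constructor
  · rintro ⟨i, hi, j, hj, k, hk, l, hl, hne, h1, h2, h3⟩
    exact ⟨(i, j), ⟨i, hi, j, hj, rfl⟩, (k, l), ⟨k, hk, l, hl, rfl⟩, hne, h1, h2, h3⟩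
  · rintro ⟨x, ⟨i, hi, j, hj, rfl⟩, y, ⟨k, hk, l, hl, rfl⟩, hne, h1, h2, h3⟩
    exact ⟨i, hi, j, hj, k, hk, l, hl, hne, h1, h2, h3⟩

lemma bLoop_range (c1 c2 : List (List Int)) (cells : List (Int × Int)) :
    ∀ seen : PySem.Set Int,
      bLoop c1 c2 cells seen = none ∨ bLoop c1 c2 cells seen = some "No son ortogonales" := by
  induction cells with
  | nil => intro seen; exact Or.inl rfl
  | cons hd t ih =>
    obtain ⟨i, j⟩ := hd
    intro seen
    rw [bLoop]
    split_ifs with h1 h2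
    · exact Or.inr rfl
    · exact ih _
    · exact ih _

lemma bLoop_none_iff (c1 c2 : List (List Int)) (cells : List (Int × Int)) :
    ∀ seen : PySem.Set Int,
      bLoop c1 c2 cells seen = none ↔
        (((cells.filter (fun p => decide (celda c1 p.1 p.2 = celda c2 p.1 p.2))).map
            (fun p => celda c1 p.1 p.2)).Nodup ∧
         ∀ p ∈ cells, celda c1 p.1 p.2 = celda c2 p.1 p.2 → celda c1 p.1 p.2 ∉ seen) := by
  induction cells with
  | nil => intro seen; simp [bLoop]
  | cons hd t ih =>
    obtain ⟨i, j⟩ := hd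
    intro seen
    rw [bLoop]
    by_cases h1 : celda c1 i j = celda c2 i j
    · rw [if_pos h1, List.filter_cons_of_pos (by simpa using h1)]
      by_cases h2 : celda c1 i j ∈ seen
      · rw [if_pos ((PySem.Set.contains_iff _ _).2 h2)]
        constructor
        · intro h; cases h
        · rintro ⟨-, hall⟩
          exact absurd h2 (hall (i, j) (by simp) h1)
      · rw [if_neg (by simp [h2]), ih]
        simp only [List.map_cons, List.nodup_cons, List.mem_map, List.mem_filter,
          List.mem_cons, PySem.Set.mem_add, not_or, decide_eq_true_eq]
        constructor
        · rintro ⟨hnd, hall⟩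
          refine ⟨⟨?_, hnd⟩, ?_⟩
          · rintro ⟨p, ⟨hp, hdg⟩, hv⟩
            exact (hall p hp hdg).2 hv
          · rintro p (rfl | hp) hdg
            · exact h2
            · exact fun hv => (hall p hp hdg).1 hv
        · rintro ⟨⟨hnm, hnd⟩, hall⟩
          refine ⟨hnd, fun p hp hdg => ⟨hall p (Or.inr hp) hdg, fun hv => hnm ⟨p, ⟨hp, hdg⟩, hv⟩⟩⟩
    · rw [if_neg h1, List.filter_cons_of_neg (by simpa using h1), ih]
      simp only [List.mem_cons]
      constructor
      · rintro ⟨hnd, hall⟩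
        refine ⟨hnd, ?_⟩
        rintro p (rfl | hp) hdg
        · exact absurd hdg h1
        · exact hall p hp hdg
      · rintro ⟨hnd, hall⟩
        exact ⟨hnd, fun p hp hdg => hall p (Or.inr hp) hdg⟩

lemma celdasDe_nodup (c1 : List (List Int)) : (celdasDe c1).Nodup := by
  have h : celdasDe c1 =
      (PySem.List.pyRange 0 (c1.length : Int) 1) ×ˢ (PySem.List.pyRange 0 (c1.length : Int) 1) := rfl
  rw [h]
  exact List.Nodup.product (PySem.List.nodup_pyRange_one _ _) (PySem.List.nodup_pyRange_one _ _)

lemma nodup_iff_no_pair (c1 c2 : List (List Int)) :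
    (((celdasDe c1).filter (fun p => decide (celda c1 p.1 p.2 = celda c2 p.1 p.2))).map
        (fun p => celda c1 p.1 p.2)).Nodup ↔
      ¬ ∃ x ∈ celdasDe c1, ∃ y ∈ celdasDe c1, x ≠ y ∧
          celda c1 x.1 x.2 = celda c2 x.1 x.2 ∧ celda c1 y.1 y.2 = celda c2 y.1 y.2 ∧
          celda c1 x.1 x.2 = celda c1 y.1 y.2 := by
  have hnd : ((celdasDe c1).filter
      (fun p => decide (celda c1 p.1 p.2 = celda c2 p.1 p.2))).Nodup :=
    (celdasDe_nodup c1).filter _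
  rw [List.nodup_map_iff_inj_on hnd]
  constructor
  · rintro hinj ⟨x, hx, y, hy, hne, hdx, hdy, hv⟩
    exact hne (hinj x (by simp [List.mem_filter, hx, hdx]) y (by simp [List.mem_filter, hy, hdy]) hv)
  · rintro hno x hx y hy hv
    rw [List.mem_filter] at hx hy
    by_contra hne
    exact hno ⟨x, hx.1, y, hy.1, hne, by simpa using hx.2, by simpa using hy.2, hv⟩

-- ===== VERDICT (by name: the statement is the Claim_ definition above) =====
theorem ortogonalidad_latina_spec : Claim_equal_ortogonalidad_latina := by
  intro c1 c2 _hdom _hpre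
  unfold Spec_ortogonalidad_latina
  rw [portA_eq]
  have halt : ortogonalidad_latina_alt c1 c2 = bLoop c1 c2 (celdasDe c1) PySem.Set.empty := rfl
  rw [halt]
  by_cases hP : ∃ x ∈ celdasDe c1, ∃ y ∈ celdasDe c1, x ≠ y ∧
      celda c1 x.1 x.2 = celda c2 x.1 x.2 ∧ celda c1 y.1 y.2 = celda c2 y.1 y.2 ∧
      celda c1 x.1 x.2 = celda c1 y.1 y.2
  · rw [if_pos hP]
    rcases bLoop_range c1 c2 (celdasDe c1) PySem.Set.empty with h | h
    · exfalso
      have hnd := ((bLoop_none_iff c1 c2 (celdasDe c1) PySem.Set.empty).1 h).1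
      exact (nodup_iff_no_pair c1 c2).1 hnd hP
    · rw [h]
  · rw [if_neg hP]
    symm
    rw [bLoop_none_iff]
    refine ⟨(nodup_iff_no_pair c1 c2).2 hP, ?_⟩
    intro p _ _ h
    simp [PySem.Set.empty] at h
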